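-- pv_equiv track=rewrite | github.com/Anonymous12358/AoC | 2022/day18/day18.py | check_face
-- ===== SOURCE A (Python) =====
-- from collections.abc import Iterator
-- from functools import reduce
-- from operator import or_
--
-- def step(coords: tuple[int, ...]) -> Iterator[tuple[int, ...]]:
--     """
--     Determine all places to which it is possible to move directly from a given position.
--     :param coords: The coordinates of the point from which to move.
--     :return: An iterator through all locations that can be visited
--     """
--     for dimension in range(len(coords)):
--         for delta in (1, -1):
--             yield coords[:dimension] + (coords[dimension] + delta,) + coords[dimension+1:]
--
-- def check_face(start: tuple[int, ...], cubes: set[tuple[int, ...]]) -> bool: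
--     """
--     Determine whether there is a path from `start` to the point at infinity.
--     :param start: The start coordinates.
--     :param cubes: A set of cubes that block the path.
--     :return: Whether there is a path.
--     """
--     if start in cubes:
--         return False
--     visited = curr = {start}
--     while curr:
--         if any(any(not 0 <= ordinate < 22 for ordinate in coords) for coords in curr):
--             return True
--         # Make a move from all current locations at once
--         curr = reduce(or_, (set(step(coords)) for coords in curr))
--         # Discard illegal moves
--         curr -= cubes
--         # Discard locations that we could already reach more efficiently
--         curr -= visited
--         visited |= curr
--     return False
-- ===== SOURCE B (Python) =====
-- def step(coords):
--     return [coords[:i] + (coords[i] + d,) + coords[i + 1:]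
--             for i in range(len(coords)) for d in (1, -1)]
--
--
-- def check_face(start, cubes):
--     if start in cubes:
--         return False
--     # Per-node BFS over a growing list used as a FIFO queue, with a visited set,
--     # instead of A's batch set-wave expansion with set unions/differences.
--     visited = {start}
--     queue = [start]
--     i = 0
--     while i < len(queue):
--         coords = queue[i]
--         i += 1
--         if any(not 0 <= ordinate < 22 for ordinate in coords):
--             return True
--         for n in step(coords):
--             if n not in cubes and n not in visited:
--                 visited.add(n)
--                 queue.append(n)
--     return False
-- ===== Notes on version B (the rewrite author's own statement) =====
-- stated objective: idiomatic
-- what changed: Replaced A's batch wave expansion (repeatedly unioning the neighbour sets of the whole frontier and subtracting cubes and visited) by a classic per-node FIFO BFS with a visited set: cells are dequeued one at a time, tested for being out of bounds, and their unvisited non-cube neighbours enqueued.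
import Mathlib
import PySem

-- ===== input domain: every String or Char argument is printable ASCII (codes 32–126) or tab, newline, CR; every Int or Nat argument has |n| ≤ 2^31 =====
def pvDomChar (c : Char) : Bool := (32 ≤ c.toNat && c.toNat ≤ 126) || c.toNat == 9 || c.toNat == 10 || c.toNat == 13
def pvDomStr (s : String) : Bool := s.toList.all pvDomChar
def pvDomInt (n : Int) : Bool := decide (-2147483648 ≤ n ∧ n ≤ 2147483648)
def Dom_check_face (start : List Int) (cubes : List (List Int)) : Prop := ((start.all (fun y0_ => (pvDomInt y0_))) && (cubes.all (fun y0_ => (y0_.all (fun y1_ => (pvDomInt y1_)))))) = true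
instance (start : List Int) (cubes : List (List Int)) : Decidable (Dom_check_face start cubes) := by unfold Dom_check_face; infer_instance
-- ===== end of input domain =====

-- B replaces A's batch set-wave expansion by a classic per-node FIFO BFS with a visited set; same exact result.

-- ===== PORT A =====
-- Shared module helper `step` (also used verbatim by B): the 2·len(coords) neighbours.
-- coords[:i] / coords[i+1:] / coords[i] are exact as take/drop/getD since 0 ≤ i < len(coords).
def pvStep (coords : List Int) : List (List Int) :=
  (List.range coords.length).flatMap (fun i =>
    [coords.take i ++ [coords.getD i 0 + 1] ++ coords.drop (i + 1),
     coords.take i ++ [coords.getD i 0 - 1] ++ coords.drop (i + 1)])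

-- `any(not 0 <= ordinate < 22 for ordinate in coords)`
def pvHasOOB (coords : List Int) : Bool :=
  coords.any (fun o => !(decide (0 ≤ o) && decide (o < 22)))

-- A's `while curr:` loop; the next frontier's emptiness is tested before recursing,
-- and `fuel` only makes the recursion structural (it is proved below never to run out).
def pvFaceLoopA (cubes : List (List Int)) (fuel : Nat)
    (visited curr : List (List Int)) : Bool :=
  match fuel with
  | 0 => false
  | fuel + 1 =>
    if curr.any pvHasOOB then true
    else
      let moved := curr.foldl (fun acc c => PySem.Set.union acc (pvStep c)) PySem.Set.empty
      let pruned := PySem.Set.diff (PySem.Set.diff moved cubes) visited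
      if pruned = [] then false
      else pvFaceLoopA cubes fuel (PySem.Set.union visited pruned) pruned

def check_face (start : List Int) (cubes : List (List Int)) : Bool :=
  if start ∈ cubes then false
  else pvFaceLoopA cubes (24 ^ start.length + 1) [start] [start]

-- ===== PORT B =====
-- B's `while i < len(queue):` loop over a growing FIFO queue with a visited set;
-- the inner `for n in step(coords):` is the foldl; same fuel remark as for A.
def pvFaceLoopB (cubes : List (List Int)) (fuel : Nat)
    (visited queue : List (List Int)) (i : Nat) : Bool :=
  match fuel with
  | 0 => false
  | fuel + 1 =>
    if h : i < queue.length then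
      let c := queue[i]
      if pvHasOOB c then true
      else
        let st := (pvStep c).foldl
          (fun (st : List (List Int) × List (List Int)) n =>
            if n ∉ cubes ∧ n ∉ st.1 then (PySem.Set.add st.1 n, st.2 ++ [n]) else st)
          (visited, queue)
        pvFaceLoopB cubes fuel st.1 st.2 (i + 1)
    else false

-- The enqueue fold, acting on the queue alone.

def check_face_alt (start : List Int) (cubes : List (List Int)) : Bool :=
  if start ∈ cubes then false
  else pvFaceLoopB cubes (2 * 24 ^ start.length + 2) [start] [start] 0

-- ===== PRECONDITION & SPEC =====
def Spec_check_face (start : List Int) (cubes : List (List Int)) (out : Bool) : Prop := out = check_face_alt start cubes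
instance (start : List Int) (cubes : List (List Int)) (out : Bool) : Decidable (Spec_check_face start cubes out) := by unfold Spec_check_face; infer_instance

-- ===== CLAIM (what is proved, stated in full; the proofs are below) =====
def Claim_equal_check_face : Prop := ∀ (start : List Int) (cubes : List (List Int)), Dom_check_face start cubes → Spec_check_face start cubes (check_face start cubes)

-- ===== LEMMAS AND PROOFS =====

-- The bounded box [-1,22]^n of cells either search can reach besides start itself (proof-only).
noncomputable def pvBox : Nat → Finset (List Int)
  | 0 => {([] : List Int)}
  | n + 1 => ((Finset.Icc (-1 : Int) 22) ×ˢ pvBox n).image (fun p => p.1 :: p.2)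

theorem mem_pvBox {n : Nat} {l : List Int} :
    l ∈ pvBox n ↔ l.length = n ∧ ∀ x ∈ l, -1 ≤ x ∧ x ≤ 22 := by
  induction n generalizing l with
  | zero => cases l <;> simp [pvBox]
  | succ n ih =>
    cases l with
    | nil => simp [pvBox]
    | cons a l =>
      simp only [pvBox, Finset.mem_image, Finset.mem_product, Finset.mem_Icc]
      constructor
      · rintro ⟨⟨x, t⟩, ⟨hx, ht⟩, h⟩
        cases h
        obtain ⟨hl, hb⟩ := ih.mp ht
        refine ⟨by simp [hl], ?_⟩
        intro y hy
        rcases List.mem_cons.mp hy with h | h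
        · exact h ▸ hx
        · exact hb y h
      · rintro ⟨hl, hb⟩
        refine ⟨(a, l), ⟨hb a (by simp), ih.mpr ⟨by simpa using hl, fun y hy => hb y (by simp [hy])⟩⟩, rfl⟩

theorem card_pvBox (n : Nat) : (pvBox n).card = 24 ^ n := by
  induction n with
  | zero => simp [pvBox]
  | succ n ih =>
    rw [pvBox, Finset.card_image_of_injective _ (fun p q h => ?_), Finset.card_product, ih]
    · rw [Int.card_Icc]; norm_num [pow_succ, Nat.mul_comm]; rfl
    · exact Prod.ext (List.cons.inj h).1 (List.cons.inj h).2

theorem mem_pvStep_iff {c c' : List Int} :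
    c' ∈ pvStep c ↔ ∃ i < c.length,
      c' = c.take i ++ [c.getD i 0 + 1] ++ c.drop (i + 1) ∨
      c' = c.take i ++ [c.getD i 0 - 1] ++ c.drop (i + 1) := by
  simp [pvStep]

theorem length_of_mem_pvStep {c c' : List Int} (h : c' ∈ pvStep c) :
    c'.length = c.length := by
  rcases mem_pvStep_iff.mp h with ⟨i, hi, h | h⟩ <;>
    subst h <;> simp <;> omega

theorem pvHasOOB_eq_false_iff {c : List Int} :
    pvHasOOB c = false ↔ ∀ x ∈ c, 0 ≤ x ∧ x < 22 := by
  simp [pvHasOOB]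

theorem mem_pvBox_of_mem_pvStep {c c' : List Int} (hin : pvHasOOB c = false)
    (h : c' ∈ pvStep c) : c' ∈ pvBox c.length := by
  have hb := pvHasOOB_eq_false_iff.mp hin
  refine mem_pvBox.mpr ⟨length_of_mem_pvStep h, ?_⟩
  intro x hx
  rcases mem_pvStep_iff.mp h with ⟨i, hi, h | h⟩ <;> subst h <;>
    simp only [List.mem_append, List.mem_singleton] at hx
  · rcases hx with (hx | hx) | hx
    · have := hb x (List.mem_of_mem_take hx); omega
    · have := hb (c.getD i 0) (List.getD_eq_getElem c 0 hi ▸ List.getElem_mem hi); omega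
    · have := hb x (List.mem_of_mem_drop hx); omega
  · rcases hx with (hx | hx) | hx
    · have := hb x (List.mem_of_mem_take hx); omega
    · have := hb (c.getD i 0) (List.getD_eq_getElem c 0 hi ▸ List.getElem_mem hi); omega
    · have := hb x (List.mem_of_mem_drop hx); omega

-- Non-cube reachability through in-bounds cells: what both searches compute.
inductive pvReach (cubes : List (List Int)) (start : List Int) : List Int → Prop
  | refl : pvReach cubes start start
  | step {b c : List Int} : pvReach cubes start b → pvHasOOB b = false →
      c ∈ pvStep b → c ∉ cubes → pvReach cubes start c

def pvEscape (start : List Int) (cubes : List (List Int)) : Prop :=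
  ∃ c, pvReach cubes start c ∧ pvHasOOB c = true

theorem pvReach_mem_closed {cubes : List (List Int)} {start : List Int}
    {S : List (List Int)} (hs : start ∈ S)
    (hcl : ∀ b ∈ S, pvHasOOB b = false → ∀ c ∈ pvStep b, c ∉ cubes → c ∈ S) :
    ∀ c, pvReach cubes start c → c ∈ S := by
  intro c h
  induction h with
  | refl => exact hs
  | step hr hb hst hnc ih => exact hcl _ ih hb _ hst hnc

noncomputable def pvExtS (start : List Int) : Finset (List Int) :=
  insert start (pvBox start.length)

theorem mem_foldl_union {l acc : List (List Int)} {x : List Int} :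
    x ∈ l.foldl (fun acc c => PySem.Set.union acc (pvStep c)) acc ↔
      x ∈ acc ∨ ∃ c ∈ l, x ∈ pvStep c := by
  induction l generalizing acc with
  | nil => simp
  | cons c l ih =>
    simp only [List.foldl_cons, ih, PySem.Set.mem_union, List.mem_cons]
    constructor
    · rintro ((h | h) | ⟨b, hb, h⟩)
      · exact Or.inl h
      · exact Or.inr ⟨c, Or.inl rfl, h⟩
      · exact Or.inr ⟨b, Or.inr hb, h⟩
    · rintro (h | ⟨b, (rfl | hb), h⟩)
      · exact Or.inl (Or.inl h)
      · exact Or.inl (Or.inr h)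
      · exact Or.inr ⟨b, hb, h⟩

theorem loopA_iff {cubes : List (List Int)} {start : List Int} :
    ∀ (fuel : Nat) (visited curr : List (List Int)),
      visited.Nodup →
      start ∈ visited →
      (∀ c ∈ curr, c ∈ visited) →
      (∀ c ∈ visited, pvReach cubes start c ∧ c ∉ cubes ∧ (c = start ∨ c ∈ pvBox start.length)) →
      (∀ c ∈ visited, c ∉ curr → pvHasOOB c = false ∧
        ∀ c' ∈ pvStep c, c' ∉ cubes → c' ∈ visited) →
      curr ≠ [] →
      (pvExtS start \ visited.toFinset).card < fuel →
      (pvFaceLoopA cubes fuel visited curr = true ↔ pvEscape start cubes) := by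
  intro fuel
  induction fuel with
  | zero => intro visited curr _ _ _ _ _ _ hf; omega
  | succ fuel ih =>
    intro visited curr hnd hstart hcv hvis hexp hne hf
    rw [pvFaceLoopA]
    by_cases hoob : curr.any pvHasOOB = true
    · simp only [hoob, if_true, true_iff]
      obtain ⟨c, hc, hcoob⟩ := List.any_eq_true.mp hoob
      exact ⟨c, (hvis c (hcv c hc)).1, hcoob⟩
    · have hoob' : ∀ c ∈ curr, pvHasOOB c = false := by
        intro c hc
        by_contra h
        exact hoob (List.any_eq_true.mpr ⟨c, hc, by revert h; cases pvHasOOB c <;> simp⟩)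
      have hoob2 : curr.any pvHasOOB = false := by simpa using hoob
      rw [hoob2]
      simp only [Bool.false_eq_true, if_false]
      set moved := curr.foldl (fun acc c => PySem.Set.union acc (pvStep c)) PySem.Set.empty with hmv
      set pruned := PySem.Set.diff (PySem.Set.diff moved cubes) visited with hpr
      have hprmem : ∀ x, x ∈ pruned ↔ (∃ c ∈ curr, x ∈ pvStep c) ∧ x ∉ cubes ∧ x ∉ visited := by
        intro x
        rw [hpr, PySem.Set.mem_diff, PySem.Set.mem_diff, hmv, mem_foldl_union]
        simp [PySem.Set.empty, and_assoc]
      by_cases hpe : pruned = []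
      · rw [if_pos hpe]
        simp only [Bool.false_eq_true, false_iff]
        rintro ⟨c, hrc, hcoob⟩
        have hcl : ∀ b ∈ visited, pvHasOOB b = false → ∀ c' ∈ pvStep b, c' ∉ cubes → c' ∈ visited := by
          intro b hb hbin c' hc' hnc
          by_cases hbc : b ∈ curr
          · by_cases hcv' : c' ∈ visited
            · exact hcv'
            · exact absurd ((hprmem c').mpr ⟨⟨b, hbc, hc'⟩, hnc, hcv'⟩) (by simp [hpe])
          · exact (hexp b hb hbc).2 c' hc' hnc
        have hcin : c ∈ visited := pvReach_mem_closed hstart hcl c hrc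
        by_cases hcc : c ∈ curr
        · rw [hoob' c hcc] at hcoob; exact Bool.false_ne_true hcoob
        · rw [(hexp c hcin hcc).1] at hcoob; exact Bool.false_ne_true hcoob
      · rw [if_neg hpe]
        apply ih (PySem.Set.union visited pruned) pruned
        · exact PySem.Set.nodup_union _ _ hnd
        · exact (PySem.Set.mem_union _ _ _).mpr (Or.inl hstart)
        · intro c hc; exact (PySem.Set.mem_union _ _ _).mpr (Or.inr hc)
        · intro c hc
          rcases (PySem.Set.mem_union _ _ _).mp hc with h | h
          · exact hvis c h
          · obtain ⟨⟨b, hb, hst⟩, hnc, hnv⟩ := (hprmem c).mp h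
            have hbv := hvis b (hcv b hb)
            have hblen : b.length = start.length := by
              rcases hbv.2.2 with rfl | hbox
              · rfl
              · exact (mem_pvBox.mp hbox).1
            exact ⟨pvReach.step hbv.1 (hoob' b hb) hst hnc, hnc,
              Or.inr (hblen ▸ mem_pvBox_of_mem_pvStep (hoob' b hb) hst)⟩
        · intro c hc hnp
          have hcv2 : c ∈ visited := by
            rcases (PySem.Set.mem_union _ _ _).mp hc with h | h
            · exact h
            · exact absurd h hnp
          by_cases hcc : c ∈ curr
          · refine ⟨hoob' c hcc, ?_⟩
            intro c' hc' hnc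
            by_cases hcv' : c' ∈ visited
            · exact (PySem.Set.mem_union _ _ _).mpr (Or.inl hcv')
            · exact (PySem.Set.mem_union _ _ _).mpr (Or.inr ((hprmem c').mpr ⟨⟨c, hcc, hc'⟩, hnc, hcv'⟩))
          · obtain ⟨h1, h2⟩ := hexp c hcv2 hcc
            exact ⟨h1, fun c' hc' hnc => (PySem.Set.mem_union _ _ _).mpr (Or.inl (h2 c' hc' hnc))⟩
        · exact hpe
        · have hsub : (pvExtS start \ (PySem.Set.union visited pruned).toFinset) ⊂
              (pvExtS start \ visited.toFinset) := by
            obtain ⟨x, hx⟩ := List.exists_mem_of_ne_nil pruned hpe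
            obtain ⟨⟨b, hb, hst⟩, hnc, hnv⟩ := (hprmem x).mp hx
            have hbv := hvis b (hcv b hb)
            have hblen : b.length = start.length := by
              rcases hbv.2.2 with rfl | hbox
              · rfl
              · exact (mem_pvBox.mp hbox).1
            have hxext : x ∈ pvExtS start :=
              Finset.mem_insert_of_mem (hblen ▸ mem_pvBox_of_mem_pvStep (hoob' b hb) hst)
            constructor
            · intro y hy
              simp only [Finset.mem_sdiff, List.mem_toFinset] at hy ⊢
              exact ⟨hy.1, fun h => hy.2 ((PySem.Set.mem_union _ _ _).mpr (Or.inl h))⟩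
            · intro hcon
              have := hcon (Finset.mem_sdiff.mpr ⟨hxext, by simp [hnv]⟩)
              simp only [Finset.mem_sdiff, List.mem_toFinset] at this
              exact this.2 ((PySem.Set.mem_union _ _ _).mpr (Or.inr hx))
          have := Finset.card_lt_card hsub
          omega

def pvEnq (cubes : List (List Int)) (l q : List (List Int)) : List (List Int) :=
  l.foldl (fun q n => if n ∉ cubes ∧ n ∉ q then q ++ [n] else q) q

theorem foldB_eq_pvEnq (cubes l : List (List Int)) :
    ∀ q : List (List Int),
      l.foldl (fun (st : List (List Int) × List (List Int)) n =>
          if n ∉ cubes ∧ n ∉ st.1 then (PySem.Set.add st.1 n, st.2 ++ [n]) else st) (q, q) =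
        (pvEnq cubes l q, pvEnq cubes l q) := by
  induction l with
  | nil => intro q; simp [pvEnq]
  | cons n l ih =>
    intro q
    simp only [List.foldl_cons, pvEnq]
    by_cases hn : n ∉ cubes ∧ n ∉ q
    · rw [if_pos hn, if_pos hn, PySem.Set.add_of_not_mem hn.2]
      exact ih (q ++ [n])
    · rw [if_neg hn, if_neg hn]
      exact ih q

theorem pvEnq_prefix (cubes l : List (List Int)) :
    ∀ q : List (List Int), q <+: pvEnq cubes l q := by
  induction l with
  | nil => intro q; simp [pvEnq]
  | cons n l ih =>
    intro q
    simp only [pvEnq, List.foldl_cons]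
    by_cases hn : n ∉ cubes ∧ n ∉ q
    · rw [if_pos hn]
      exact List.IsPrefix.trans ⟨[n], rfl⟩ (ih (q ++ [n]))
    · rw [if_neg hn]; exact ih q

theorem mem_pvEnq (cubes l : List (List Int)) :
    ∀ (q : List (List Int)) (x : List Int),
      x ∈ pvEnq cubes l q ↔ x ∈ q ∨ (x ∈ l ∧ x ∉ cubes) := by
  induction l with
  | nil => intro q x; simp [pvEnq]
  | cons n l ih =>
    intro q x
    simp only [pvEnq, List.foldl_cons] at *
    by_cases hn : n ∉ cubes ∧ n ∉ q
    · rw [if_pos hn, ih]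
      have h1 := hn.1
      simp only [List.mem_append, List.mem_cons, List.not_mem_nil, or_false]
      by_cases hx : x = n
      · subst hx; tauto
      · tauto
    · rw [if_neg hn, ih]
      rcases Decidable.not_and_iff_not_or_not.mp hn with h | h
      · have hc : n ∈ cubes := Decidable.not_not.mp h
        constructor
        · rintro (h1 | ⟨h1, h2⟩)
          · exact Or.inl h1
          · exact Or.inr ⟨List.mem_cons_of_mem _ h1, h2⟩
        · rintro (h1 | ⟨h1, h2⟩)
          · exact Or.inl h1
          · rcases List.mem_cons.mp h1 with rfl | h1
            · exact absurd hc h2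
            · exact Or.inr ⟨h1, h2⟩
      · have hq : n ∈ q := Decidable.not_not.mp h
        constructor
        · rintro (h1 | ⟨h1, h2⟩)
          · exact Or.inl h1
          · exact Or.inr ⟨List.mem_cons_of_mem _ h1, h2⟩
        · rintro (h1 | ⟨h1, h2⟩)
          · exact Or.inl h1
          · rcases List.mem_cons.mp h1 with rfl | h1
            · exact Or.inl hq
            · exact Or.inr ⟨h1, h2⟩

theorem nodup_pvEnq (cubes l : List (List Int)) :
    ∀ q : List (List Int), q.Nodup → (pvEnq cubes l q).Nodup := by
  induction l with
  | nil => intro q hq; simpa [pvEnq] using hq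
  | cons n l ih =>
    intro q hq
    simp only [pvEnq, List.foldl_cons]
    by_cases hn : n ∉ cubes ∧ n ∉ q
    · rw [if_pos hn]
      exact ih _ (hq.append (List.nodup_singleton n) (by simp [List.disjoint_singleton, hn.2]))
    · rw [if_neg hn]; exact ih q hq

theorem loopB_iff {cubes : List (List Int)} {start : List Int} :
    ∀ (fuel : Nat) (visited queue : List (List Int)) (i : Nat),
      visited = queue →
      queue.Nodup →
      start ∈ queue →
      i ≤ queue.length →
      (∀ c ∈ queue, pvReach cubes start c ∧ c ∉ cubes ∧ (c = start ∨ c ∈ pvBox start.length)) →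
      (∀ c ∈ queue.take i, pvHasOOB c = false ∧
        ∀ c' ∈ pvStep c, c' ∉ cubes → c' ∈ queue) →
      2 * (pvExtS start \ queue.toFinset).card + (queue.length - i) < fuel →
      (pvFaceLoopB cubes fuel visited queue i = true ↔ pvEscape start cubes) := by
  intro fuel
  induction fuel with
  | zero => intro _ _ _ _ _ _ _ _ _ hf; omega
  | succ fuel ih =>
    intro visited queue i hvq hnd hstart hile hq hproc hf
    rw [hvq]
    rw [pvFaceLoopB]
    by_cases hi : i < queue.length
    · rw [dif_pos hi]
      have hcq : queue[i] ∈ queue := List.getElem_mem hi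
      obtain ⟨hreach, hncube, hbox⟩ := hq _ hcq
      by_cases hoob : pvHasOOB queue[i] = true
      · simp only [hoob, if_true, true_iff]
        exact ⟨queue[i], hreach, hoob⟩
      · have hoob2 : pvHasOOB queue[i] = false := by simpa using hoob
        simp only [hoob2, Bool.false_eq_true, if_false, foldB_eq_pvEnq]
        set F := pvEnq cubes (pvStep queue[i]) queue with hF
        have hpre : queue <+: F := pvEnq_prefix cubes _ queue
        obtain ⟨t, ht⟩ := hpre
        have hFnd : F.Nodup := nodup_pvEnq cubes _ queue hnd
        have hdisj : ∀ x ∈ t, x ∉ queue := by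
          intro x hx hxq
          have := (List.nodup_append.mp (ht ▸ hFnd)).2.2
          exact this x hxq x hx rfl
        have htnd : t.Nodup := (List.nodup_append.mp (ht ▸ hFnd)).2.1
        have hlen : F.length = queue.length + t.length := by
          rw [← ht, List.length_append]
        have hclen : queue[i].length = start.length := by
          rcases hbox with rfl | hb
          · rfl
          · exact (mem_pvBox.mp hb).1
        have hnew : ∀ x, x ∈ F → x ∉ queue → x ∈ pvStep queue[i] ∧ x ∉ cubes := by
          intro x hx hxq
          rcases (mem_pvEnq cubes _ queue x).mp hx with h | h
          · exact absurd h hxq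
          · exact h
        have hnewbox : ∀ x, x ∈ F → x ∉ queue → x ∈ pvBox start.length := by
          intro x hx hxq
          exact hclen ▸ mem_pvBox_of_mem_pvStep hoob2 (hnew x hx hxq).1
        apply ih F F (i + 1) rfl hFnd (ht ▸ List.mem_append_left t hstart)
        · omega
        · intro c hc
          by_cases hcq2 : c ∈ queue
          · exact hq c hcq2
          · obtain ⟨hst, hnc⟩ := hnew c hc hcq2
            exact ⟨pvReach.step hreach hoob2 hst hnc, hnc, Or.inr (hnewbox c hc hcq2)⟩
        · have htake : F.take (i + 1) = queue.take i ++ [queue[i]] := by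
            rw [← ht, List.take_append_of_le_length (by omega), List.take_add_one,
              List.getElem?_eq_getElem hi]
            rfl
          rw [htake]
          intro c hc
          rcases List.mem_append.mp hc with hcc | hcc
          · obtain ⟨h1, h2⟩ := hproc c hcc
            exact ⟨h1, fun c' hc' hnc => ht ▸ List.mem_append_left t (h2 c' hc' hnc)⟩
          · have hce : c = queue[i] := by simpa using hcc
            subst hce
            refine ⟨hoob2, ?_⟩
            intro c' hc' hnc
            rw [hF]
            exact (mem_pvEnq cubes _ queue c').mpr (Or.inr ⟨hc', hnc⟩)
        · have htsub : t.toFinset ⊆ pvExtS start \ queue.toFinset := by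
            intro x hx
            rw [List.mem_toFinset] at hx
            have hxF : x ∈ F := ht ▸ List.mem_append_right queue hx
            have hxq := hdisj x hx
            exact Finset.mem_sdiff.mpr
              ⟨Finset.mem_insert_of_mem (hnewbox x hxF hxq), by simpa using hxq⟩
          have hFset : pvExtS start \ F.toFinset =
              (pvExtS start \ queue.toFinset) \ t.toFinset := by
            ext y
            simp only [Finset.mem_sdiff, List.mem_toFinset, ← ht, List.mem_append]
            tauto
          have hcard : (pvExtS start \ F.toFinset).card + t.length =
              (pvExtS start \ queue.toFinset).card := by
            rw [hFset, ← List.toFinset_card_of_nodup htnd]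
            exact Finset.card_sdiff_add_card_eq_card htsub
          omega
    · rw [dif_neg hi]
      simp only [Bool.false_eq_true, false_iff]
      rintro ⟨c, hrc, hcoob⟩
      have hall : queue.take i = queue := List.take_of_length_le (by omega)
      rw [hall] at hproc
      have hcl : ∀ b ∈ queue, pvHasOOB b = false → ∀ c' ∈ pvStep b, c' ∉ cubes → c' ∈ queue := by
        intro b hb _ c' hc' hnc
        exact (hproc b hb).2 c' hc' hnc
      have hcin : c ∈ queue := pvReach_mem_closed hstart hcl c hrc
      rw [(hproc c hcin).1] at hcoob
      exact Bool.false_ne_true hcoob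

theorem initial_card_le {start : List Int} :
    (pvExtS start \ ([start] : List (List Int)).toFinset).card ≤ 24 ^ start.length := by
  have hsub : pvExtS start \ ([start] : List (List Int)).toFinset ⊆ pvBox start.length := by
    intro x hx
    rw [Finset.mem_sdiff] at hx
    rcases Finset.mem_insert.mp hx.1 with rfl | h
    · exact absurd (by simp) hx.2
    · exact h
  calc _ ≤ (pvBox start.length).card := Finset.card_le_card hsub
    _ = 24 ^ start.length := card_pvBox _

theorem check_face_eq (start : List Int) (cubes : List (List Int)) :
    check_face start cubes = check_face_alt start cubes := by
  unfold check_face check_face_alt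
  by_cases h : start ∈ cubes
  · rw [if_pos h, if_pos h]
  · rw [if_neg h, if_neg h]
    have hvis : ∀ c ∈ ([start] : List (List Int)),
        pvReach cubes start c ∧ c ∉ cubes ∧ (c = start ∨ c ∈ pvBox start.length) := by
      intro c hc
      have : c = start := by simpa using hc
      subst this
      exact ⟨pvReach.refl, h, Or.inl rfl⟩
    have hA := loopA_iff (cubes := cubes) (start := start) (24 ^ start.length + 1)
      [start] [start] (List.nodup_singleton start) (by simp) (fun c hc => hc) hvis
      (fun c hc hnc => absurd hc hnc) (by simp)
      (by have := initial_card_le (start := start); omega)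
    have hB := loopB_iff (cubes := cubes) (start := start) (2 * 24 ^ start.length + 2)
      [start] [start] 0 rfl (List.nodup_singleton start) (by simp) (by simp) hvis
      (by simp)
      (by have := initial_card_le (start := start); simp only [List.length_singleton]; omega)
    exact Bool.eq_iff_iff.mpr (hA.trans hB.symm)

-- ===== VERDICT (by name: the statement is the Claim_ definition above) =====
theorem check_face_spec : Claim_equal_check_face := by
  intro start cubes _
  unfold Spec_check_face
  exact check_face_eq start cubes
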